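-- pv_equiv track=rewrite | github.com/ADavidBailey/Practice-Bidding-Scenarios | build-scripts-mac/pbn_diff/raw_diff.py | format_raw_diff
-- ===== SOURCE A (Python) =====
-- from typing import List, Optional
--
-- def format_raw_diff(
--     diff_lines: List[str], use_color: bool = True, head_limit: int = 0
-- ) -> str:
--     """
--     Format raw diff lines with optional ANSI colors.
--
--     Args:
--         diff_lines: Lines from unified_diff
--         use_color: Whether to add ANSI color codes
--         head_limit: Limit output to first N hunks (0 = no limit)
--
--     Returns:
--         Formatted string
--     """
--     RED = "\033[91m"
--     GREEN = "\033[92m"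
--     CYAN = "\033[96m"
--     YELLOW = "\033[93m"
--     RESET = "\033[0m"
--
--     # Split diff into hunks (each starting with @@)
--     hunks: List[List[str]] = []
--     current_hunk: List[str] = []
--     header_lines: List[str] = []
--
--     for line in diff_lines:
--         if line.startswith("@@"):
--             if current_hunk:
--                 hunks.append(current_hunk)
--             current_hunk = [line]
--         elif line.startswith("---") or line.startswith("+++"):
--             header_lines.append(line)
--         elif current_hunk:
--             current_hunk.append(line)
--
--     if current_hunk:
--         hunks.append(current_hunk)
--
--     # Apply head limit
--     total_hunks = len(hunks)
--     truncated = False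
--     if head_limit > 0 and total_hunks > head_limit:
--         hunks = hunks[:head_limit]
--         truncated = True
--
--     # Format output
--     result = []
--
--     # Add header lines
--     for line in header_lines:
--         if use_color:
--             result.append(f"{CYAN}{line}{RESET}")
--         else:
--             result.append(line)
--
--     # Add hunks
--     for hunk in hunks:
--         for line in hunk:
--             if not use_color:
--                 result.append(line)
--             elif line.startswith("@@"):
--                 result.append(f"{CYAN}{line}{RESET}")
--             elif line.startswith("+"):
--                 result.append(f"{GREEN}{line}{RESET}")
--             elif line.startswith("-"):
--                 result.append(f"{RED}{line}{RESET}")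
--             else:
--                 result.append(line)
--
--     # Add truncation message
--     if truncated:
--         remaining = total_hunks - head_limit
--         msg = f"\n... and {remaining} more diff hunks (use --head 0 for all)\n"
--         if use_color:
--             result.append(f"{YELLOW}{msg}{RESET}")
--         else:
--             result.append(msg)
--
--     return "".join(result)
-- ===== SOURCE B (Python) =====
-- def format_raw_diff(diff_lines, use_color=True, head_limit=0):
--     """Single streaming pass: count hunks on the fly, emit colored lines inline,
--     never materializing a list-of-lists of hunks."""
--     RED = "\033[91m"
--     GREEN = "\033[92m"
--     CYAN = "\033[96m"
--     YELLOW = "\033[93m"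
--     RESET = "\033[0m"
--
--     def paint(color, line):
--         return f"{color}{line}{RESET}" if use_color else line
--
--     headers = []
--     body = []
--     hunk_count = 0
--     for line in diff_lines:
--         if line.startswith("---") or line.startswith("+++"):
--             headers.append(paint(CYAN, line))
--         elif line.startswith("@@"):
--             hunk_count += 1
--             if head_limit <= 0 or hunk_count <= head_limit:
--                 body.append(paint(CYAN, line))
--         elif hunk_count > 0 and (head_limit <= 0 or hunk_count <= head_limit):
--             if line.startswith("+"):
--                 body.append(paint(GREEN, line))
--             elif line.startswith("-"):
--                 body.append(paint(RED, line))
--             else: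
--                 body.append(line)
--
--     parts = headers + body
--     if head_limit > 0 and hunk_count > head_limit:
--         remaining = hunk_count - head_limit
--         parts.append(paint(YELLOW, f"\n... and {remaining} more diff hunks (use --head 0 for all)\n"))
--     return "".join(parts)
-- ===== Notes on version B (the rewrite author's own statement) =====
-- stated objective: alternative
-- what changed: Replaces A's two-phase build-list-of-hunks-then-truncate-then-recolor pipeline with a single streaming pass that keeps only a hunk counter and appends colored lines inline, never materializing hunks.
import Mathlib
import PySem

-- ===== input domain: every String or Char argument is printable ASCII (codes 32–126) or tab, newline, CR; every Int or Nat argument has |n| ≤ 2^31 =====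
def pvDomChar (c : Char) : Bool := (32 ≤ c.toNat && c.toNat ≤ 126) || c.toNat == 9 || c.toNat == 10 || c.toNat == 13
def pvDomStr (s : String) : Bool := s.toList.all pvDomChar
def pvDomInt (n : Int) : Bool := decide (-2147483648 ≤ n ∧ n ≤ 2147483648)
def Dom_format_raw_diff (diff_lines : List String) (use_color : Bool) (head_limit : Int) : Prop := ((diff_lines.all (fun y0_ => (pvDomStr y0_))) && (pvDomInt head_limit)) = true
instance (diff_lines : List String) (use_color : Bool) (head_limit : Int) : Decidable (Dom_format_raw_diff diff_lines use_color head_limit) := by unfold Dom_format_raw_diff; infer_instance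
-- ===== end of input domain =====

-- B replaces A's build-hunks-then-truncate-then-recolor pipeline by one streaming pass with a hunk
-- counter (alternative decomposition, same asymptotic cost).

-- ===== PORT A =====
-- the body of A's first for-loop, state = (hunks, current_hunk, header_lines)
def pvA_step (st : List (List String) × List String × List String) (line : String) :
    List (List String) × List String × List String :=
  if PySem.Str.startswith line "@@" then
    ((if st.2.1 ≠ [] then st.1 ++ [st.2.1] else st.1), [line], st.2.2)
  else if PySem.Str.startswith line "---" || PySem.Str.startswith line "+++" then
    (st.1, st.2.1, st.2.2 ++ [line])
  else if st.2.1 ≠ [] then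
    (st.1, st.2.1 ++ [line], st.2.2)
  else st

def format_raw_diff (diff_lines : List String) (use_color : Bool) (head_limit : Int) : String :=
  let st := diff_lines.foldl pvA_step ([], [], [])
  let hunks0 := if st.2.1 ≠ [] then st.1 ++ [st.2.1] else st.1
  let header_lines := st.2.2
  let total_hunks : Int := (hunks0.length : Int)
  let hunks := if 0 < head_limit ∧ head_limit < total_hunks then
      PySem.List.slice hunks0 none (some head_limit) else hunks0
  let result : List String := header_lines.foldl
    (fun r line => if use_color then r ++ ["\x1B[96m" ++ line ++ "\x1B[0m"] else r ++ [line]) []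
  let result := hunks.foldl (fun r hunk => hunk.foldl (fun r line =>
      if !use_color then r ++ [line]
      else if PySem.Str.startswith line "@@" then r ++ ["\x1B[96m" ++ line ++ "\x1B[0m"]
      else if PySem.Str.startswith line "+" then r ++ ["\x1B[92m" ++ line ++ "\x1B[0m"]
      else if PySem.Str.startswith line "-" then r ++ ["\x1B[91m" ++ line ++ "\x1B[0m"]
      else r ++ [line]) r) result
  let result := if 0 < head_limit ∧ head_limit < total_hunks then
      result ++ [if use_color then
          "\x1B[93m" ++ ("\n... and " ++ PySem.Int.toStr (total_hunks - head_limit) ++ " more diff hunks (use --head 0 for all)\n") ++ "\x1B[0m"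
        else "\n... and " ++ PySem.Int.toStr (total_hunks - head_limit) ++ " more diff hunks (use --head 0 for all)\n"]
    else result
  PySem.Str.join "" result

-- ===== PORT B =====
-- Source B's paint helper
def pvPaint (use_color : Bool) (color : String) (line : String) : String :=
  if use_color then color ++ line ++ "\x1B[0m" else line

-- the body of Source B's single loop, state = (headers, body, hunk_count)
def pvB_step (use_color : Bool) (head_limit : Int)
    (st : List String × List String × Int) (line : String) : List String × List String × Int :=
  if PySem.Str.startswith line "---" || PySem.Str.startswith line "+++" then
    (st.1 ++ [pvPaint use_color "\x1B[96m" line], st.2.1, st.2.2)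
  else if PySem.Str.startswith line "@@" then
    (st.1,
     (if head_limit ≤ 0 ∨ st.2.2 + 1 ≤ head_limit then st.2.1 ++ [pvPaint use_color "\x1B[96m" line] else st.2.1),
     st.2.2 + 1)
  else if 0 < st.2.2 ∧ (head_limit ≤ 0 ∨ st.2.2 ≤ head_limit) then
    (st.1,
     st.2.1 ++ [if PySem.Str.startswith line "+" then pvPaint use_color "\x1B[92m" line
                else if PySem.Str.startswith line "-" then pvPaint use_color "\x1B[91m" line
                else line],
     st.2.2)
  else st

def format_raw_diff_alt (diff_lines : List String) (use_color : Bool) (head_limit : Int) : String :=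
  let st := diff_lines.foldl (pvB_step use_color head_limit) ([], [], 0)
  let parts := st.1 ++ st.2.1
  let parts := if 0 < head_limit ∧ head_limit < st.2.2 then
      parts ++ [pvPaint use_color "\x1B[93m"
        ("\n... and " ++ PySem.Int.toStr (st.2.2 - head_limit) ++ " more diff hunks (use --head 0 for all)\n")]
    else parts
  PySem.Str.join "" parts

-- ===== PRECONDITION & SPEC =====
def Spec_format_raw_diff (diff_lines : List String) (use_color : Bool) (head_limit : Int) (out : String) : Prop := out = format_raw_diff_alt diff_lines use_color head_limit
instance (diff_lines : List String) (use_color : Bool) (head_limit : Int) (out : String) : Decidable (Spec_format_raw_diff diff_lines use_color head_limit out) := by unfold Spec_format_raw_diff; infer_instance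

-- ===== CLAIM (what is proved, stated in full; the proofs are below) =====
def Claim_equal_format_raw_diff : Prop := ∀ (diff_lines : List String) (use_color : Bool) (head_limit : Int), Dom_format_raw_diff diff_lines use_color head_limit → Spec_format_raw_diff diff_lines use_color head_limit (format_raw_diff diff_lines use_color head_limit)

-- ===== LEMMAS AND PROOFS =====

-- the per-line coloring A's second loop performs on hunk lines
def pvCl (uc : Bool) (line : String) : String :=
  if !uc then line
  else if PySem.Str.startswith line "@@" then "\x1B[96m" ++ line ++ "\x1B[0m"
  else if PySem.Str.startswith line "+" then "\x1B[92m" ++ line ++ "\x1B[0m"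
  else if PySem.Str.startswith line "-" then "\x1B[91m" ++ line ++ "\x1B[0m"
  else line

-- the hunk A's loop is currently building, as a (possibly empty) list of hunks
def pvCw (c : List String) : List (List String) := if c = [] then [] else [c]

-- truncation to the first head_limit hunks (identity when head_limit ≤ 0)
def pvTakeL (L : Int) (l : List (List String)) : List (List String) :=
  if L ≤ 0 then l else l.take L.toNat

-- abstraction map: B's loop state as a function of A's loop state
def pvPhi (uc : Bool) (L : Int) (st : List (List String) × List String × List String) :
    List String × List String × Int :=
  (st.2.2.map (pvPaint uc "\x1B[96m"),
   (pvTakeL L (st.1 ++ pvCw st.2.1)).flatMap (List.map (pvCl uc)),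
   ((st.1 ++ pvCw st.2.1).length : Int))

-- A's loop invariant: before the first "@@" line nothing has been collected
def pvInv (st : List (List String) × List String × List String) : Prop := st.2.1 = [] → st.1 = []

theorem pv_at_not_dash (line : String) (h : PySem.Str.startswith line "@@" = true) :
    PySem.Str.startswith line "---" = false := by
  simp only [PySem.Str.startswith_eq, PySem.Chars.startswith_iff] at h ⊢
  rw [← Bool.not_eq_true]
  simp only [PySem.Chars.startswith_iff]
  obtain ⟨t, ht⟩ := h
  rintro ⟨u, hu⟩
  rw [← ht] at hu
  simp at hu

theorem pv_at_not_plus (line : String) (h : PySem.Str.startswith line "@@" = true) :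
    PySem.Str.startswith line "+++" = false := by
  simp only [PySem.Str.startswith_eq, PySem.Chars.startswith_iff] at h ⊢
  rw [← Bool.not_eq_true]
  simp only [PySem.Chars.startswith_iff]
  obtain ⟨t, ht⟩ := h
  rintro ⟨u, hu⟩
  rw [← ht] at hu
  simp at hu

-- appending one hunk: kept in the truncated view iff there is still room
theorem pv_takeL_snoc (f : String → String) (L : Int) (X : List (List String)) (c : List String) :
    (pvTakeL L (X ++ [c])).flatMap (List.map f)
      = (pvTakeL L X).flatMap (List.map f)
        ++ (if L ≤ 0 ∨ (X.length : Int) < L then c.map f else []) := by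
  by_cases h0 : L ≤ 0
  · simp [pvTakeL, h0]
  · rw [pvTakeL, pvTakeL, if_neg h0, if_neg h0, List.take_append]
    by_cases h1 : (X.length : Int) < L
    · rw [List.take_of_length_le (show X.length ≤ L.toNat by omega)]
      rw [show List.take (L.toNat - X.length) [c] = [c] from
        List.take_of_length_le (by simp; omega)]
      rw [if_pos (Or.inr h1)]
      simp
    · rw [Nat.sub_eq_zero_of_le (by omega), List.take_zero, if_neg (by omega)]
      simp

theorem pv_inv_step (st : List (List String) × List String × List String) (line : String)
    (h : pvInv st) : pvInv (pvA_step st line) := by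
  unfold pvA_step pvInv at *
  split_ifs with h1 h2 h3 h4 <;> simp_all

-- one loop step of B tracks one loop step of A through the abstraction map
theorem pv_step_comm (uc : Bool) (L : Int)
    (st : List (List String) × List String × List String) (line : String) (hinv : pvInv st) :
    pvB_step uc L (pvPhi uc L st) line = pvPhi uc L (pvA_step st line) := by
  obtain ⟨hs, c, hd⟩ := st
  by_cases hat : PySem.Str.startswith line "@@" = true
  · -- "@@": A starts a new hunk, B increments the counter
    have hd3 := pv_at_not_dash line hat
    have hp3 := pv_at_not_plus line hat
    have hcnt : ((hs ++ pvCw c).length : Int) + 1 ≤ L ↔ ((hs ++ pvCw c).length : Int) < L := by omega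
    simp only [pvB_step, pvA_step, pvPhi, hat, hd3, hp3, Bool.or_self, Bool.false_eq_true,
      if_false, if_true]
    have hform : (if c ≠ [] then hs ++ [c] else hs) = hs ++ pvCw c := by
      by_cases hc : c = [] <;> simp [pvCw, hc]
    rw [hform]
    have : pvCw [line] = [[line]] := by simp [pvCw]
    rw [show hs ++ pvCw c ++ pvCw [line] = (hs ++ pvCw c) ++ [[line]] by simp [this]]
    rw [pv_takeL_snoc]
    have hatc : PySem.Chars.startswith line.toList ['@', '@'] = true := by simpa using hat
    simp only [Prod.mk.injEq]
    have hlen3 : ((hs ++ pvCw c).length : Int) + 1 = ((hs ++ pvCw c ++ [[line]]).length : Int) := by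
      simp only [List.length_append, List.length_cons, List.length_nil]
      omega
    refine ⟨trivial, ?_, hlen3⟩
    by_cases hk : L ≤ 0 ∨ ((hs ++ pvCw c).length : Int) + 1 ≤ L
    · rw [if_pos hk, if_pos (by rcases hk with hk | hk; exact Or.inl hk; exact Or.inr (by omega))]
      cases uc <;> simp [pvCl, pvPaint, hatc]
    · rw [if_neg hk, if_neg (by omega)]
      simp
  · by_cases hhd : (PySem.Str.startswith line "---" || PySem.Str.startswith line "+++") = true
    · -- header line
      simp only [pvB_step, pvA_step, pvPhi, hat, hhd, Bool.false_eq_true, if_false, if_true]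
      simp
    · -- body line
      have hc0 : c = [] ↔ ((hs ++ pvCw c).length : Int) = 0 := by
        constructor
        · intro hc
          have hhs : hs = [] := hinv hc
          simp [pvCw, hc, hhs]
        · intro hl; by_contra hc
          simp [pvCw, hc] at hl
          omega
      simp only [pvB_step, pvA_step, pvPhi, hat, hhd, Bool.false_eq_true, if_false]
      by_cases hc : c ≠ []
      · rw [if_pos hc]
        have hcw : pvCw c = [c] := by simp [pvCw, hc]
        have hcw' : pvCw (c ++ [line]) = [c ++ [line]] := by simp [pvCw]
        have hpos : 0 < ((hs ++ pvCw c).length : Int) := by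
          by_contra hp
          push_neg at hp
          exact hc (hc0.mpr (by simp [hcw] at hp ⊢; omega))
        have hlen : ((hs ++ pvCw c).length : Int) = (hs.length : Int) + 1 := by simp [hcw]
        rw [show hs ++ pvCw (c ++ [line]) = (hs ++ [c.concat line]) by simp [hcw']]
        rw [show hs ++ pvCw c = hs ++ [c] from by rw [hcw]]
        by_cases hk : L ≤ 0 ∨ ((hs ++ [c]).length : Int) ≤ L
        · rw [if_pos ⟨by simpa [hcw] using hpos, by simpa [hcw] using hk⟩]
          rw [pv_takeL_snoc, pv_takeL_snoc]
          have hkk : L ≤ 0 ∨ (hs.length : Int) < L := by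
            rcases hk with hk | hk; exact Or.inl hk
            right; simp at hk; omega
          rw [if_pos hkk, if_pos hkk]
          have hatc : PySem.Chars.startswith line.toList ['@', '@'] = false := by
            simpa using hat
          simp only [Prod.mk.injEq]
          refine ⟨trivial, ?_, by simp⟩
          simp only [List.concat_eq_append, List.map_append, List.map_cons, List.map_nil,
            List.append_assoc]
          congr 2
          cases uc <;> simp [pvCl, pvPaint, hatc] <;> rfl
        · rw [if_neg (by
            rintro ⟨-, hor⟩
            exact hk (by simpa [hcw] using hor))]
          rw [pv_takeL_snoc, pv_takeL_snoc]
          have hkk : ¬ (L ≤ 0 ∨ (hs.length : Int) < L) := by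
            simp only [List.length_append, List.length_cons, List.length_nil] at hk
            omega
          rw [if_neg hkk, if_neg hkk]
          simp
      · push_neg at hc
        rw [if_neg (by
          rintro ⟨hpos, -⟩
          rw [hc0.mp hc] at hpos
          omega)]
        simp [hc]

theorem pv_fold_comm (uc : Bool) (L : Int) (ls : List String)
    (st : List (List String) × List String × List String) (hinv : pvInv st) :
    ls.foldl (pvB_step uc L) (pvPhi uc L st) = pvPhi uc L (ls.foldl pvA_step st) := by
  induction ls generalizing st with
  | nil => rfl
  | cons x xs ih =>
    simp only [List.foldl_cons]
    rw [pv_step_comm uc L st x hinv, ih _ (pv_inv_step st x hinv)]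

theorem format_raw_diff_spec : Claim_equal_format_raw_diff := by
  intro diff_lines uc L _
  unfold Spec_format_raw_diff format_raw_diff format_raw_diff_alt
  have h0 : pvPhi uc L ([], [], []) = (([], [], 0) : List String × List String × Int) := by
    simp [pvPhi, pvCw, pvTakeL]
  rw [← h0, pv_fold_comm uc L diff_lines ([], [], []) (by intro _; rfl)]
  set stA := diff_lines.foldl pvA_step ([], [], []) with hstA
  obtain ⟨hs, c, hd⟩ := stA
  simp only [pvPhi]
  -- normalize A's post-loop reassembly
  have hform : (if c ≠ [] then hs ++ [c] else hs) = hs ++ pvCw c := by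
    by_cases hc : c = [] <;> simp [pvCw, hc]
  rw [hform]
  set hunksF := hs ++ pvCw c with hH
  -- A's header loop
  rw [show (fun (r : List String) line => if uc = true then r ++ ["\x1B[96m" ++ line ++ "\x1B[0m"] else r ++ [line])
        = (fun r line => r ++ [pvPaint uc "\x1B[96m" line]) by
    funext r line; cases uc <;> simp [pvPaint]]
  rw [PySem.List.foldl_append_singleton_eq_map]
  -- A's inner hunk loop is an append of the colored hunk
  have hinner : ∀ (hunk : List String) (r : List String),
      hunk.foldl (fun r line =>
        if !uc then r ++ [line]
        else if PySem.Str.startswith line "@@" then r ++ ["\x1B[96m" ++ line ++ "\x1B[0m"]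
        else if PySem.Str.startswith line "+" then r ++ ["\x1B[92m" ++ line ++ "\x1B[0m"]
        else if PySem.Str.startswith line "-" then r ++ ["\x1B[91m" ++ line ++ "\x1B[0m"]
        else r ++ [line]) r = r ++ hunk.map (pvCl uc) := by
    intro hunk r
    rw [show (fun (r : List String) line =>
        if !uc then r ++ [line]
        else if PySem.Str.startswith line "@@" then r ++ ["\x1B[96m" ++ line ++ "\x1B[0m"]
        else if PySem.Str.startswith line "+" then r ++ ["\x1B[92m" ++ line ++ "\x1B[0m"]
        else if PySem.Str.startswith line "-" then r ++ ["\x1B[91m" ++ line ++ "\x1B[0m"]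
        else r ++ [line]) = (fun r line => r ++ [pvCl uc line]) by
      funext r line; simp only [pvCl]; split_ifs <;> rfl]
    exact PySem.List.foldl_append_singleton_eq_map ..
  have houter : ∀ (ks : List (List String)) (r : List String),
      ks.foldl (fun r hunk => hunk.foldl (fun r line =>
        if !uc then r ++ [line]
        else if PySem.Str.startswith line "@@" then r ++ ["\x1B[96m" ++ line ++ "\x1B[0m"]
        else if PySem.Str.startswith line "+" then r ++ ["\x1B[92m" ++ line ++ "\x1B[0m"]
        else if PySem.Str.startswith line "-" then r ++ ["\x1B[91m" ++ line ++ "\x1B[0m"]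
        else r ++ [line]) r) r = r ++ ks.flatMap (List.map (pvCl uc)) := by
    intro ks r
    rw [show (fun (r : List String) (hunk : List String) => hunk.foldl (fun r line =>
        if !uc then r ++ [line]
        else if PySem.Str.startswith line "@@" then r ++ ["\x1B[96m" ++ line ++ "\x1B[0m"]
        else if PySem.Str.startswith line "+" then r ++ ["\x1B[92m" ++ line ++ "\x1B[0m"]
        else if PySem.Str.startswith line "-" then r ++ ["\x1B[91m" ++ line ++ "\x1B[0m"]
        else r ++ [line]) r) = (fun r hunk => r ++ hunk.map (pvCl uc)) by
      funext r hunk; exact hinner hunk r]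
    exact PySem.List.foldl_append_eq_flatMap ..
  rw [houter]
  -- truncated hunks = pvTakeL
  have hkept : (if 0 < L ∧ L < (hunksF.length : Int) then
      PySem.List.slice hunksF none (some L) else hunksF) = pvTakeL L hunksF := by
    by_cases h0 : 0 < L
    · by_cases h1 : L < (hunksF.length : Int)
      · rw [if_pos ⟨h0, h1⟩, pvTakeL, if_neg (by omega), PySem.List.slice_to _ (le_of_lt h0)]
      · rw [if_neg (by tauto), pvTakeL, if_neg (by omega)]
        rw [List.take_of_length_le (by omega)]
    · rw [if_neg (by tauto), pvTakeL, if_pos (by omega)]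
  rw [hkept]
  -- truncation message
  by_cases ht : 0 < L ∧ L < (hunksF.length : Int)
  · rw [if_pos ht, if_pos ht]
    cases uc <;> simp [pvPaint]
  · rw [if_neg ht, if_neg ht]
    simp
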